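-- pv_equiv track=rewrite | github.com/nvrtmd/algorithm-solving | Programmers/Programmers 104.py | solution
-- ===== SOURCE A (Python) =====
-- def convert(target, number):
--     result = ''
--     num_to_alphabet = {10: "A", 11: "B", 12: "C", 13: "D", 14: "E", 15: "F"}
--     while target > 0:
--         target, mod = divmod(target, number)
--         if number > 10 and 10 <= mod <= 15:
--             result += str(num_to_alphabet[mod])
--         else:
--             result += str(mod)
--
--     return result[::-1]
--
-- def solution(numbers):
--     answer = []
--     for number in numbers:
--         if number == 0:
--             answer.append(1)
--             continue
--         converted = convert(number, 2)
--         arr = list(converted)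
--         for i in range(len(arr) - 1, 0, -1):
--             if arr[i] == '0':
--                 try:
--                     arr[i + 1] = '0'
--                 except:
--                     pass
--                 arr[i] = '1'
--                 break
--         else:
--             arr[0] = '0'
--             arr = ['1'] + arr
--
--         target = 0
--         for idx, num in enumerate(arr[::-1]):
--             target += (2 ** int(idx)) * int(num)
--         else:
--             answer.append(target)
--
--     return answer
-- ===== SOURCE B (Python) =====
-- def solution(numbers):
--     answer = []
--     for n in numbers:
--         if n % 2 == 0:
--             # even (including 0): flipping the last zero bit just adds 1
--             answer.append(n + 1)
--         else:
--             # odd: count trailing 1-bits t; A's rewrite adds 2^(t-1)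
--             t = 0
--             m = n
--             while m % 2 == 1:
--                 t += 1
--                 m //= 2
--             answer.append(n + (1 << (t - 1)))
--     return answer
-- ===== Notes on version B (the rewrite author's own statement) =====
-- stated objective: simpler
-- what changed: Replaces A's build-binary-string / scan-for-first-zero / mutate-chars / re-sum-powers pipeline with per-element arithmetic: even n maps to n+1, odd n maps to n + 2^(trailing-ones - 1).
import Mathlib
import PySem

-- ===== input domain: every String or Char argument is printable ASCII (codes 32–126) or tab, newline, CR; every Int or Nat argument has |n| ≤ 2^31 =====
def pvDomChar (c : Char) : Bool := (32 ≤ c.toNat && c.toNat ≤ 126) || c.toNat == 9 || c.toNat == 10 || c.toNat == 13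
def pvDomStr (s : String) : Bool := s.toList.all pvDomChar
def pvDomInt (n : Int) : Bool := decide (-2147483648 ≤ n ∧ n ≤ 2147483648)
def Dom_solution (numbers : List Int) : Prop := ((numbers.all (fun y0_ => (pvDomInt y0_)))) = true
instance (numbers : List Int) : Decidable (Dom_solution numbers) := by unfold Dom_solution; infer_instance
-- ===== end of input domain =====

-- B replaces A's build-binary-string / scan-for-zero / mutate / re-sum pipeline with direct
-- arithmetic per element (even: n+1; odd: n + 2^(trailing-ones-1)); objective: simpler.

-- ===== PORT A =====
def numToAlphabet : PySem.Dict Int String :=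
  PySem.Dict.ofList [(10, "A"), (11, "B"), (12, "C"), (13, "D"), (14, "E"), (15, "F")]

-- int(num) for a single digit character; never `none` on the '0'/'1' digits A feeds it
def intOfDigitChar (c : Char) : Int := (PySem.Int.ofChars? [c]).getD 0

-- the `while target > 0` loop of convert; fuel is only a totality guard: for the one call site
-- (number = 2) each iteration strictly decreases target, so fuel target.toNat + 1 never runs out
def convertAux : Nat → Int → Int → List Char → List Char
  | 0, _, _, result => result
  | fuel + 1, target, number, result =>
    if target > 0 then
      -- divmod(target, number); number = 2 ≠ 0 at the one call site, so no ZeroDivisionError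
      let q := PySem.Int.floordiv target number
      let r := PySem.Int.mod target number
      let result :=
        if number > 10 ∧ 10 ≤ r ∧ r ≤ 15 then
          result ++ ((PySem.Dict.get? numToAlphabet r).getD "").toList
        else
          result ++ PySem.Int.toChars r
      convertAux fuel q number result
    else result

def convert (target : Int) (number : Int) : List Char :=
  (convertAux (target.toNat + 1) target number []).reverse

-- the `for i in range(len(arr)-1, 0, -1): … break / else: …` loop; the `try arr[i+1]='0'
-- except: pass` is List.set, which is a no-op out of range exactly like the caught IndexError
def scanLoop : List Char → Nat → List Char
  | arr, 0 => '1' :: arr.set 0 '0'          -- range exhausted: for-else branch, arr[0]='0'; ['1'] + arr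
  | arr, i + 1 =>
    if PySem.List.pyGet? arr ((i + 1 : Nat) : Int) = some '0' then
      (arr.set (i + 2) '0').set (i + 1) '1'
    else scanLoop arr i

-- body of A's loop for number ≠ 0
def solveOne (number : Int) : Int :=
  let arr := convert number 2
  let arr2 := scanLoop arr (arr.length - 1)
  -- target accumulation over enumerate(arr[::-1]); idx ≥ 0 always, so 2 ** idx = 2 ^ idx.toNat
  (PySem.List.enumerate arr2.reverse).foldl
    (fun target p => target + 2 ^ p.1.toNat * intOfDigitChar p.2) 0

def solution (numbers : List Int) : List Int :=
  numbers.foldl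
    (fun answer number =>
      if number = 0 then answer ++ [1] else answer ++ [solveOne number]) []

-- ===== PORT B =====
-- Source B's `while m % 2 == 1: t += 1; m //= 2`, exact on the nonnegative ints Pre_ admits
def trailOnes : Nat → Nat
  | 0 => 0
  | m + 1 => if (m + 1) % 2 = 1 then trailOnes ((m + 1) / 2) + 1 else 0
  decreasing_by exact Nat.div_lt_self (Nat.succ_pos m) one_lt_two

def nextNum (n : Int) : Int :=
  if PySem.Int.mod n 2 = 0 then n + 1
  else n + ((1 : Int) <<< (trailOnes n.toNat - 1))

def solution_alt (numbers : List Int) : List Int := numbers.map nextNum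

-- ===== PRECONDITION & SPEC =====
-- A raises IndexError on any negative element (its binary string is empty), so Pre_ excludes those
def Pre_solution (numbers : List Int) : Prop := ∀ n ∈ numbers, 0 ≤ n
instance (numbers : List Int) : Decidable (Pre_solution numbers) := by
  unfold Pre_solution; infer_instance
def pvWitness_solution : List Int := [0, 1, 2, 6, 11, 12]

def Spec_solution (numbers : List Int) (out : List Int) : Prop := out = solution_alt numbers
instance (numbers : List Int) (out : List Int) : Decidable (Spec_solution numbers out) := by
  unfold Spec_solution; infer_instance

-- ===== CLAIM (what is proved, stated in full; the proofs are below) =====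
def Claim_equal_solution : Prop :=
  ∀ (numbers : List Int), Dom_solution numbers → Pre_solution numbers →
    Spec_solution numbers (solution numbers)

-- ===== LEMMAS AND PROOFS =====

-- binary digits of m, least significant first
def natBits : Nat → List Char
  | 0 => []
  | m + 1 => (if (m + 1) % 2 = 1 then '1' else '0') :: natBits ((m + 1) / 2)
  decreasing_by exact Nat.div_lt_self (Nat.succ_pos m) one_lt_two

-- value of an LSB-first digit list, with A's own digit reader
def bitsVal : List Char → Int
  | [] => 0
  | c :: cs => intOfDigitChar c + 2 * bitsVal cs

lemma toChars_mod_two (m : Nat) :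
    PySem.Int.toChars ((m % 2 : Nat) : Int) = [if m % 2 = 1 then '1' else '0'] := by
  rcases Nat.mod_two_eq_zero_or_one m with h | h <;> rw [h] <;> decide

lemma convertAux_eq (fuel : Nat) : ∀ (m : Nat) (result : List Char), m ≤ fuel →
    convertAux fuel (m : Int) 2 result = result ++ natBits m := by
  induction fuel with
  | zero => intro m result h; interval_cases m; simp [convertAux, natBits]
  | succ fuel ih =>
    intro m result h
    match m with
    | 0 => simp [convertAux, natBits]
    | m + 1 =>
      rw [convertAux]
      have hpos : ((m + 1 : Nat) : Int) > 0 := by positivity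
      rw [if_pos hpos]
      have hfd : PySem.Int.floordiv ((m + 1 : Nat) : Int) 2 = (((m + 1) / 2 : Nat) : Int) := by
        exact_mod_cast PySem.Int.floordiv_natCast (m + 1) 2
      have hmd : PySem.Int.mod ((m + 1 : Nat) : Int) 2 = (((m + 1) % 2 : Nat) : Int) := by
        exact_mod_cast PySem.Int.mod_natCast (m + 1) 2
      simp only [hfd, hmd]
      rw [if_neg (by norm_num)]
      rw [ih ((m + 1) / 2) _ (by omega), toChars_mod_two]
      rw [natBits]
      simp

lemma convert_eq (m : Nat) : convert (m : Int) 2 = (natBits m).reverse := by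
  have : ((m : Int)).toNat = m := Int.toNat_natCast m
  rw [convert, this, convertAux_eq (m + 1) m [] (by omega)]
  simp

lemma digit_one : intOfDigitChar '1' = 1 := by decide
lemma digit_zero : intOfDigitChar '0' = 0 := by decide

lemma bitsVal_natBits : ∀ m : Nat, bitsVal (natBits m) = (m : Int) := by
  intro m
  induction m using natBits.induct with
  | case1 => simp [natBits, bitsVal]
  | case2 m ih =>
    rw [natBits, bitsVal, ih]
    have hdm := Nat.div_add_mod (m + 1) 2
    rcases Nat.mod_two_eq_zero_or_one (m + 1) with h | h <;>
      · rw [h] at hdm ⊢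
        simp only [if_pos, Nat.zero_ne_one, reduceIte, digit_one, digit_zero]
        omega

lemma natBits_ne_nil (m : Nat) (hm : 0 < m) : natBits m ≠ [] := by
  match m with
  | m + 1 => rw [natBits]; simp

lemma natBits_last (m : Nat) (hm : 0 < m) :
    (natBits m).getLast? = some '1' := by
  induction m using natBits.induct with
  | case1 => omega
  | case2 m ih =>
    rw [natBits]
    by_cases h2 : (m + 1) / 2 = 0
    · have h1 : m + 1 = 1 := by omega
      rw [h2]
      simp [h1, natBits]
    · have hne := natBits_ne_nil ((m + 1) / 2) (by omega)
      rw [show ∀ (c : Char) (l : List Char), l ≠ [] → (c :: l).getLast? = l.getLast? from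
        fun c l h => by cases l with
          | nil => exact absurd rfl h
          | cons d t => simp [List.getLast?_cons_cons]]
      · exact ih (by omega)
      · exact hne

-- the trailing-ones bundle: positions below t are '1', position t (if any) is '0', t ≤ length
lemma trail_bundle : ∀ m : Nat, 0 < m →
    (∀ j < trailOnes m, (natBits m)[j]? = some '1') ∧
    (trailOnes m < (natBits m).length → (natBits m)[trailOnes m]? = some '0') ∧
    trailOnes m ≤ (natBits m).length := by
  intro m
  induction m using natBits.induct with
  | case1 => omega
  | case2 m ih =>
    intro _
    rcases Nat.mod_two_eq_zero_or_one (m + 1) with h | h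
    · rw [natBits, trailOnes]
      simp [h]
    · rw [natBits, trailOnes, if_pos h, if_pos h]
      by_cases h2 : (m + 1) / 2 = 0
      · rw [h2]
        refine ⟨?_, ?_, ?_⟩
        · intro j hj
          simp only [trailOnes] at hj
          have : j = 0 := by omega
          simp [this]
        · intro hlt
          simp [trailOnes, natBits] at hlt
        · simp [trailOnes, natBits]
      · obtain ⟨ih1, ih2, ih3⟩ := ih (by omega)
        refine ⟨?_, ?_, ?_⟩
        · intro j hj
          match j with
          | 0 => simp
          | j + 1 => simpa using ih1 j (by omega)
        · intro hlt
          simpa using ih2 (by simpa using hlt)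
        · simpa using ih3

-- t = length - 1 is impossible (the most significant bit is '1')
lemma trail_ne_pred (m : Nat) (hm : 0 < m)
    (h : trailOnes m + 1 = (natBits m).length) : False := by
  obtain ⟨-, h2, -⟩ := trail_bundle m hm
  have hlt : trailOnes m < (natBits m).length := by omega
  have h0 := h2 hlt
  have hlast := natBits_last m hm
  rw [List.getLast?_eq_getElem?] at hlast
  rw [← h] at hlast
  simp only [Nat.add_sub_cancel] at hlast
  rw [h0] at hlast
  simp at hlast

lemma scan_desc (k : Nat) : ∀ (i : Nat) (arr : List Char), 1 ≤ i →
    PySem.List.pyGet? arr (i : Int) = some '0' →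
    (∀ j : Nat, i < j → j ≤ i + k → PySem.List.pyGet? arr (j : Int) ≠ some '0') →
    scanLoop arr (i + k) = (arr.set (i + 1) '0').set i '1' := by
  induction k with
  | zero =>
    intro i arr hi h0 _
    match i with
    | i + 1 => rw [scanLoop, if_pos h0]
  | succ k ih =>
    intro i arr hi h0 hup
    have : i + (k + 1) = (i + k) + 1 := by omega
    rw [this, scanLoop, if_neg (by exact_mod_cast hup (i + k + 1) (by omega) (by omega))]
    exact ih i arr hi h0 (fun j h1 h2 => hup j h1 (by omega))

lemma scan_ones : ∀ (i : Nat) (arr : List Char),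
    (∀ j : Nat, 1 ≤ j → j ≤ i → PySem.List.pyGet? arr (j : Int) ≠ some '0') →
    scanLoop arr i = '1' :: arr.set 0 '0' := by
  intro i
  induction i with
  | zero => intro arr _; rw [scanLoop]
  | succ i ih =>
    intro arr h
    rw [scanLoop, if_neg (by exact_mod_cast h (i + 1) (by omega) (by omega))]
    exact ih arr (fun j h1 h2 => h j h1 (by omega))

lemma set_reverse (bs : List Char) (j : Nat) (h : j < bs.length) (c : Char) :
    bs.reverse.set (bs.length - 1 - j) c = (bs.set j c).reverse := by
  apply List.ext_getElem
  · simp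
  · intro i h1 h2
    have hi : i < bs.length := by simpa using h1
    simp only [List.getElem_reverse, List.getElem_set, List.length_set]
    split_ifs <;> first | rfl | omega

lemma enum_foldl (cs : List Char) : ∀ (s : Nat) (acc : Int),
    (PySem.List.enumerate cs (s : Int)).foldl
      (fun target p => target + 2 ^ p.1.toNat * intOfDigitChar p.2) acc
    = acc + 2 ^ s * bitsVal cs := by
  induction cs with
  | nil => intro s acc; simp [PySem.List.enumerate, bitsVal]
  | cons c cs ih =>
    intro s acc
    rw [PySem.List.enumerate]
    have : ((s : Int) + 1) = ((s + 1 : Nat) : Int) := by push_cast; ring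
    simp only [List.foldl_cons, this, ih (s + 1)]
    rw [bitsVal]
    have hs : ((s : Int)).toNat = s := Int.toNat_natCast s
    rw [hs]
    ring

lemma bitsVal_set (cs : List Char) : ∀ (j : Nat) (c d : Char), cs[j]? = some d →
    bitsVal (cs.set j c) = bitsVal cs + 2 ^ j * (intOfDigitChar c - intOfDigitChar d) := by
  induction cs with
  | nil => intro j c d h; simp at h
  | cons e cs ih =>
    intro j c d h
    match j with
    | 0 =>
      simp only [List.getElem?_cons_zero, Option.some.injEq] at h
      subst h
      simp only [List.set_cons_zero, bitsVal, pow_zero]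
      ring
    | j + 1 =>
      simp only [List.getElem?_cons_succ] at h
      simp only [List.set_cons_succ, bitsVal, ih j c d h, pow_succ]
      ring

lemma bitsVal_append_one (cs : List Char) : bitsVal (cs ++ ['1']) = bitsVal cs + 2 ^ cs.length := by
  induction cs with
  | nil => simp [bitsVal]; decide
  | cons c cs ih =>
    rw [List.cons_append, bitsVal, bitsVal, ih, List.length_cons, pow_succ]; ring

lemma trailOnes_pos_of_odd (m : Nat) (h : m % 2 = 1) : 1 ≤ trailOnes m := by
  match m with
  | m + 1 => rw [trailOnes, if_pos h]; omega

lemma trailOnes_zero_of_even (m : Nat) (h : m % 2 = 0) : trailOnes m = 0 := by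
  match m with
  | 0 => rw [trailOnes]
  | m + 1 => rw [trailOnes]; simp [h]

lemma natBits_len_pos (m : Nat) (hm : 0 < m) : 0 < (natBits m).length :=
  List.length_pos_iff.mpr (natBits_ne_nil m hm)

lemma natBits_len_two (m : Nat) (hm : 2 ≤ m) : 2 ≤ (natBits m).length := by
  match m with
  | m + 1 =>
    rw [natBits]
    have := natBits_len_pos ((m + 1) / 2) (by omega)
    simp only [List.length_cons]
    omega

lemma pyGet_rev (bs : List Char) (j : Nat) (hj : j < bs.length) :
    PySem.List.pyGet? bs.reverse ((j : Nat) : Int) = bs[bs.length - 1 - j]? := by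
  rw [PySem.List.pyGet?_natCast]
  exact List.getElem?_reverse (by simpa using hj)

lemma solveOne_eq (n : Int) (hn : 0 < n) : solveOne n = nextNum n := by
  obtain ⟨m, rfl⟩ : ∃ m : Nat, n = (m : Int) :=
    ⟨n.toNat, (Int.toNat_of_nonneg (le_of_lt hn)).symm⟩
  have hm : 0 < m := by exact_mod_cast hn
  obtain ⟨F1, F2, F3⟩ := trail_bundle m hm
  set bs := natBits m with hbs
  set t := trailOnes m with ht
  have hLpos : 0 < bs.length := natBits_len_pos m hm
  have hmod : PySem.Int.mod ((m : Nat) : Int) 2 = ((m % 2 : Nat) : Int) := by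
    exact_mod_cast PySem.Int.mod_natCast m 2
  simp only [solveOne, convert_eq m, List.length_reverse, nextNum, hmod, ← hbs]
  rcases Nat.mod_two_eq_zero_or_one m with heven | hodd
  · -- m even: the scan flips the last bit (bs[0]) to '1'; A returns m + 1
    rw [heven]
    have ht0 : t = 0 := trailOnes_zero_of_even m heven
    have hbs0 : bs[0]? = some '0' := by
      have h := F2 (by omega)
      rwa [ht0] at h
    have hL2 : 2 ≤ bs.length := natBits_len_two m (by omega)
    have hscan : scanLoop bs.reverse (bs.length - 1) = (bs.set 0 '1').reverse := by
      have h1 : bs.length - 1 = (bs.length - 1) + 0 := rfl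
      rw [h1, scan_desc 0 (bs.length - 1) bs.reverse (by omega) ?_ (by omega)]
      · have hnoop : bs.reverse.set (bs.length - 1 + 1) '0' = bs.reverse :=
          List.set_eq_of_length_le (by simp only [List.length_reverse]; omega)
        rw [hnoop]
        exact set_reverse bs 0 (by omega) '1'
      · rw [pyGet_rev bs (bs.length - 1) (by omega),
          show bs.length - 1 - (bs.length - 1) = 0 by omega, hbs0]
    rw [hscan, List.reverse_reverse]
    have hv := enum_foldl (bs.set 0 '1') 0 0
    simp only [Nat.cast_zero, pow_zero, one_mul, zero_add] at hv
    rw [hv, bitsVal_set bs 0 '1' '0' hbs0, bitsVal_natBits m, digit_one, digit_zero]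
    norm_num
  · -- m odd with t trailing ones: A returns m + 2^(t-1)
    rw [hodd]
    rw [if_neg (by norm_num), Int.toNat_natCast, ← ht, Int.shiftLeft_eq, one_mul]
    have ht1 : 1 ≤ t := trailOnes_pos_of_odd m hodd
    by_cases htL : t = bs.length
    · -- all ones: for-else branch; result is bs with top bit cleared, '1' appended
      have hscan : scanLoop bs.reverse (bs.length - 1)
          = '1' :: (bs.set (bs.length - 1) '0').reverse := by
        rw [scan_ones (bs.length - 1) bs.reverse ?_]
        · rw [show (0 : Nat) = bs.length - 1 - (bs.length - 1) by omega,
            set_reverse bs (bs.length - 1) (by omega) '0']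
        · intro j hj1 hj2
          rw [pyGet_rev bs j (by omega), F1 (bs.length - 1 - j) (by omega)]
          simp
      rw [hscan, show ('1' :: (bs.set (bs.length - 1) '0').reverse).reverse
          = (bs.set (bs.length - 1) '0') ++ ['1'] by simp]
      have hlast : bs[bs.length - 1]? = some '1' := by
        have h := natBits_last m hm
        rwa [List.getLast?_eq_getElem?, ← hbs] at h
      have hv := enum_foldl ((bs.set (bs.length - 1) '0') ++ ['1']) 0 0
      simp only [Nat.cast_zero, pow_zero, one_mul, zero_add] at hv
      rw [hv, bitsVal_append_one, bitsVal_set bs (bs.length - 1) '0' '1' hlast,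
        bitsVal_natBits m, digit_one, digit_zero, List.length_set]
      rw [show t - 1 = bs.length - 1 by omega]
      have hp : (2 : Int) ^ bs.length = 2 ^ (bs.length - 1) * 2 := by
        rw [← pow_succ]; congr 1; omega
      rw [hp]; ring
    · -- a '0' exists at position t ≤ length - 2: flip it to '1', clear the '1' below it
      have htL2 : t + 2 ≤ bs.length := by
        have h4 : t + 1 ≠ bs.length := fun hc => trail_ne_pred m hm hc
        omega
      have hbst : bs[t]? = some '0' := F2 (by omega)
      have hscan : scanLoop bs.reverse (bs.length - 1)
          = ((bs.set (t - 1) '0').set t '1').reverse := by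
        rw [show bs.length - 1 = (bs.length - 1 - t) + t by omega,
          scan_desc t (bs.length - 1 - t) bs.reverse (by omega) ?_ ?_]
        · rw [show bs.length - 1 - t + 1 = bs.length - 1 - (t - 1) by omega,
            set_reverse bs (t - 1) (by omega) '0',
            show bs.length - 1 - t = (bs.set (t - 1) '0').length - 1 - t by
              simp only [List.length_set]]
          exact set_reverse (bs.set (t - 1) '0') t (by simpa using (by omega : t < bs.length)) '1'
        · rw [pyGet_rev bs (bs.length - 1 - t) (by omega),
            show bs.length - 1 - (bs.length - 1 - t) = t by omega, hbst]
        · intro j hj1 hj2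
          rw [pyGet_rev bs j (by omega), F1 (bs.length - 1 - j) (by omega)]
          simp
      rw [hscan, List.reverse_reverse]
      have hbs't : (bs.set (t - 1) '0')[t]? = some '0' := by
        rw [List.getElem?_set_ne (by omega)]
        exact hbst
      have hbst1 : bs[t - 1]? = some '1' := F1 (t - 1) (by omega)
      have hv := enum_foldl ((bs.set (t - 1) '0').set t '1') 0 0
      simp only [Nat.cast_zero, pow_zero, one_mul, zero_add] at hv
      rw [hv, bitsVal_set (bs.set (t - 1) '0') t '1' '0' hbs't,
        bitsVal_set bs (t - 1) '0' '1' hbst1, bitsVal_natBits m,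
        digit_one, digit_zero]
      have hp : (2 : Int) ^ t = 2 ^ (t - 1) * 2 := by
        rw [← pow_succ]; congr 1; omega
      rw [hp]; ring

lemma foldl_body (numbers : List Int) : ∀ acc : List Int,
    numbers.foldl
      (fun answer number =>
        if number = 0 then answer ++ [1] else answer ++ [solveOne number]) acc
    = acc ++ numbers.map (fun n => if n = 0 then 1 else solveOne n) := by
  induction numbers with
  | nil => intro acc; simp
  | cons n ns ih =>
    intro acc
    by_cases h : n = 0 <;> simp [h, ih, List.append_assoc]

-- ===== VERDICT (by name: the statement is the Claim_ definition above) =====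
theorem solution_spec : Claim_equal_solution := by
  intro numbers _ hpre
  unfold Spec_solution solution solution_alt
  rw [foldl_body numbers []]
  simp only [List.nil_append]
  apply List.map_congr_left
  intro n hn
  have h0 : 0 ≤ n := hpre n hn
  by_cases hz : n = 0
  · subst hz; decide
  · rw [if_neg hz, solveOne_eq n (by omega)]
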